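-- pv_equiv track=rewrite | github.com/suminjeff/baekjoon | 백준/Silver/1475. 방 번호/방 번호.py | solve
-- ===== SOURCE A (Python) =====
-- def solve(n):
--     numbers = [0 for _ in range(10)]
--     while n > 0:
--         i = n % 10
--         n //= 10
--         if (i == 6) or (i == 9):
--             six, nine = numbers[6], numbers[9]
--             if six > nine:
--                 numbers[9] += 1
--             else:
--                 numbers[6] += 1
--         else:
--             numbers[i] += 1
--     return max(numbers)
-- ===== SOURCE B (Python) =====
-- def solve(n):
--     counts = [0] * 10
--     m = n
--     while m > 0:
--         counts[m % 10] += 1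
--         m //= 10
--     counts[6] = counts[9] = (counts[6] + counts[9] + 1) // 2
--     return max(counts)
-- ===== Notes on version B (the rewrite author's own statement) =====
-- stated objective: simpler
-- what changed: A balances the shared six/nine plates one digit at a time inside the loop with a comparison branch; B counts plain digit frequencies in one pass and then sets both the six-count and nine-count at once to the closed-form ceiling of half their total.
import Mathlib
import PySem

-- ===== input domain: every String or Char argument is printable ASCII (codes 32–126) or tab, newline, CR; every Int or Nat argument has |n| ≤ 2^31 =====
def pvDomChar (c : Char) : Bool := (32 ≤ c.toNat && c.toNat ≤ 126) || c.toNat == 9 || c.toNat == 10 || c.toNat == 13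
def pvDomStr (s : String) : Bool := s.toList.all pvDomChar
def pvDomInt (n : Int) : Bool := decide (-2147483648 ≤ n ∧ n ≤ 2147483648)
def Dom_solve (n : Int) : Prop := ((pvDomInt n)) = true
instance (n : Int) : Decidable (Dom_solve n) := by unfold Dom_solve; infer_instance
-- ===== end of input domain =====

-- B is simpler: A balances the shared 6/9 plates one digit at a time with a comparison branch
-- inside the loop; B counts plain digit frequencies and applies the closed form (c6+c9+1)//2 once.

-- termination helper for the digit loops (cited by name in decreasing_by)
theorem pv_div10_toNat_lt (n : Int) (h : 0 < n) :
    (PySem.Int.floordiv n 10).toNat < n.toNat := by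
  rw [PySem.Int.floordiv_eq_ediv_of_pos (by norm_num)]
  omega

-- ===== PORT A =====
-- the while loop; indexing numbers[i] uses i.toNat: here 0 ≤ i = n % 10 < 10, in range
def solveLoop (n : Int) (numbers : List Int) : List Int :=
  if h : 0 < n then
    let i := PySem.Int.mod n 10
    let n' := PySem.Int.floordiv n 10
    if i = 6 ∨ i = 9 then
      let six := numbers.getD 6 0
      let nine := numbers.getD 9 0
      if six > nine then solveLoop n' (numbers.set 9 (nine + 1))
      else solveLoop n' (numbers.set 6 (six + 1))
    else solveLoop n' (numbers.set i.toNat (numbers.getD i.toNat 0 + 1))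
  else numbers
termination_by n.toNat
decreasing_by all_goals exact pv_div10_toNat_lt n h

def solve (n : Int) : Int :=
  let numbers := solveLoop n (List.replicate 10 0)
  -- max(numbers): the list always has 10 elements, so max? is always some
  match PySem.List.max? numbers (fun x => x) with
  | some m => m
  | none => 0

-- ===== PORT B =====
def solveAltLoop (m : Int) (counts : List Int) : List Int :=
  if h : 0 < m then
    solveAltLoop (PySem.Int.floordiv m 10)
      (counts.set (PySem.Int.mod m 10).toNat (counts.getD (PySem.Int.mod m 10).toNat 0 + 1))
  else counts
termination_by m.toNat
decreasing_by exact pv_div10_toNat_lt m h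

def solve_alt (n : Int) : Int :=
  let counts := solveAltLoop n (List.replicate 10 0)
  let c := PySem.Int.floordiv (counts.getD 6 0 + counts.getD 9 0 + 1) 2
  let counts' := (counts.set 6 c).set 9 c
  -- max(counts): the list always has 10 elements, so max? is always some
  match PySem.List.max? counts' (fun x => x) with
  | some m => m
  | none => 0

-- ===== PRECONDITION & SPEC =====
def Spec_solve (n : Int) (out : Int) : Prop := out = solve_alt n
instance (n : Int) (out : Int) : Decidable (Spec_solve n out) := by unfold Spec_solve; infer_instance

-- ===== CLAIM (what is proved, stated in full; the proofs are below) =====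
def Claim_equal_solve : Prop := ∀ (n : Int), Dom_solve n → Spec_solve n (solve n)

-- ===== LEMMAS AND PROOFS =====

set_option maxHeartbeats 1000000

theorem pv_dvd_iff (n : Int) : (10:Int) ∣ n ↔ n % 10 = 0 := by omega

theorem pv_max_swap (X f c : Int) (h1 : f ≤ c) (h2 : c ≤ X) : max X f = max X c := by
  rw [max_eq_left (le_trans h1 h2), max_eq_left h2]

-- count of digit d in the decimal expansion of n (0 for n ≤ 0), proof-side helper
def dcount (n : Int) (d : Int) : Int :=
  if h : 0 < n then
    (if PySem.Int.mod n 10 = d then 1 else 0) + dcount (PySem.Int.floordiv n 10) d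
  else 0
termination_by n.toNat
decreasing_by exact pv_div10_toNat_lt n h

theorem loopB_char (k : Nat) : ∀ (n : Int), n.toNat ≤ k →
    ∀ c0 c1 c2 c3 c4 c5 c6 c7 c8 c9 : Int,
    solveAltLoop n [c0, c1, c2, c3, c4, c5, c6, c7, c8, c9] =
      [c0 + dcount n 0, c1 + dcount n 1, c2 + dcount n 2, c3 + dcount n 3,
       c4 + dcount n 4, c5 + dcount n 5, c6 + dcount n 6, c7 + dcount n 7,
       c8 + dcount n 8, c9 + dcount n 9] := by
  induction k with
  | zero =>
    intro n hn c0 c1 c2 c3 c4 c5 c6 c7 c8 c9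
    have hne : ¬ 0 < n := by omega
    rw [solveAltLoop, dif_neg hne]
    simp [dcount, hne]
  | succ k ih =>
    intro n hn c0 c1 c2 c3 c4 c5 c6 c7 c8 c9
    by_cases h : 0 < n
    · have hmodlo : 0 ≤ PySem.Int.mod n 10 := PySem.Int.mod_nonneg n (by norm_num)
      have hmodhi : PySem.Int.mod n 10 < 10 := PySem.Int.mod_lt n (by norm_num)
      have hfd : PySem.Int.floordiv n 10 = n / 10 :=
        PySem.Int.floordiv_eq_ediv_of_pos (by norm_num)
      have hlt : (n / 10).toNat ≤ k := by
        have := pv_div10_toNat_lt n h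
        rw [hfd] at this
        omega
      have hd : ∀ d : Int, dcount n d =
          (if PySem.Int.mod n 10 = d then 1 else 0) + dcount (n / 10) d := by
        intro d; rw [dcount, dif_pos h, hfd]
      rw [solveAltLoop, dif_pos h, hfd]
      have hcase : PySem.Int.mod n 10 = 0 ∨ PySem.Int.mod n 10 = 1 ∨ PySem.Int.mod n 10 = 2 ∨
          PySem.Int.mod n 10 = 3 ∨ PySem.Int.mod n 10 = 4 ∨ PySem.Int.mod n 10 = 5 ∨
          PySem.Int.mod n 10 = 6 ∨ PySem.Int.mod n 10 = 7 ∨ PySem.Int.mod n 10 = 8 ∨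
          PySem.Int.mod n 10 = 9 := by omega
      rcases hcase with hm | hm | hm | hm | hm | hm | hm | hm | hm | hm <;>
        · have hmem := (PySem.Int.mod_eq_emod_of_pos (a := n) (b := 10) (by norm_num)).symm.trans hm
          simp only [hm, show ((0:Int).toNat) = 0 from rfl, show ((1:Int).toNat) = 1 from rfl, show ((2:Int).toNat) = 2 from rfl, show ((3:Int).toNat) = 3 from rfl, show ((4:Int).toNat) = 4 from rfl, show ((5:Int).toNat) = 5 from rfl, show ((6:Int).toNat) = 6 from rfl, show ((7:Int).toNat) = 7 from rfl, show ((8:Int).toNat) = 8 from rfl, show ((9:Int).toNat) = 9 from rfl]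
          norm_num [List.set, List.getD]
          rw [ih _ hlt]
          simp [hd, hm, hmem, pv_dvd_iff n]
          try omega
    · rw [solveAltLoop, dif_neg h]
      simp [dcount, h]

theorem loopA_char (k : Nat) : ∀ (n : Int), n.toNat ≤ k →
    ∀ c0 c1 c2 c3 c4 c5 c6 c7 c8 c9 : Int, c9 ≤ c6 → c6 ≤ c9 + 1 →
    solveLoop n [c0, c1, c2, c3, c4, c5, c6, c7, c8, c9] =
      [c0 + dcount n 0, c1 + dcount n 1, c2 + dcount n 2, c3 + dcount n 3,
       c4 + dcount n 4, c5 + dcount n 5,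
       (c6 + c9 + dcount n 6 + dcount n 9 + 1) / 2,
       c7 + dcount n 7, c8 + dcount n 8,
       (c6 + c9 + dcount n 6 + dcount n 9) / 2] := by
  induction k with
  | zero =>
    intro n hn c0 c1 c2 c3 c4 c5 c6 c7 c8 c9 hb1 hb2
    have hne : ¬ 0 < n := by omega
    rw [solveLoop, dif_neg hne]
    simp [dcount, hne]
    constructor <;> omega
  | succ k ih =>
    intro n hn c0 c1 c2 c3 c4 c5 c6 c7 c8 c9 hb1 hb2
    by_cases h : 0 < n
    · have hmodlo : 0 ≤ PySem.Int.mod n 10 := PySem.Int.mod_nonneg n (by norm_num)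
      have hmodhi : PySem.Int.mod n 10 < 10 := PySem.Int.mod_lt n (by norm_num)
      have hfd : PySem.Int.floordiv n 10 = n / 10 :=
        PySem.Int.floordiv_eq_ediv_of_pos (by norm_num)
      have hlt : (n / 10).toNat ≤ k := by
        have := pv_div10_toNat_lt n h
        rw [hfd] at this
        omega
      have hd : ∀ d : Int, dcount n d =
          (if PySem.Int.mod n 10 = d then 1 else 0) + dcount (n / 10) d := by
        intro d; rw [dcount, dif_pos h, hfd]
      rw [solveLoop, dif_pos h]
      simp only [hfd]
      have hcase : PySem.Int.mod n 10 = 0 ∨ PySem.Int.mod n 10 = 1 ∨ PySem.Int.mod n 10 = 2 ∨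
          PySem.Int.mod n 10 = 3 ∨ PySem.Int.mod n 10 = 4 ∨ PySem.Int.mod n 10 = 5 ∨
          PySem.Int.mod n 10 = 6 ∨ PySem.Int.mod n 10 = 7 ∨ PySem.Int.mod n 10 = 8 ∨
          PySem.Int.mod n 10 = 9 := by omega
      rcases hcase with hm | hm | hm | hm | hm | hm | hm | hm | hm | hm
      · have hmem := (PySem.Int.mod_eq_emod_of_pos (a := n) (b := 10) (by norm_num)).symm.trans hm
        simp only [hm, show ((0:Int).toNat) = 0 from rfl, show ((1:Int).toNat) = 1 from rfl, show ((2:Int).toNat) = 2 from rfl, show ((3:Int).toNat) = 3 from rfl, show ((4:Int).toNat) = 4 from rfl, show ((5:Int).toNat) = 5 from rfl, show ((6:Int).toNat) = 6 from rfl, show ((7:Int).toNat) = 7 from rfl, show ((8:Int).toNat) = 8 from rfl, show ((9:Int).toNat) = 9 from rfl]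
        norm_num [List.set, List.getD]
        rw [ih _ hlt _ _ _ _ _ _ _ _ _ _ hb1 hb2]
        simp [hd, hm, hmem, (show (10:Int) ∣ n from by omega)]
        try omega
      · have hmem := (PySem.Int.mod_eq_emod_of_pos (a := n) (b := 10) (by norm_num)).symm.trans hm
        simp only [hm, show ((0:Int).toNat) = 0 from rfl, show ((1:Int).toNat) = 1 from rfl, show ((2:Int).toNat) = 2 from rfl, show ((3:Int).toNat) = 3 from rfl, show ((4:Int).toNat) = 4 from rfl, show ((5:Int).toNat) = 5 from rfl, show ((6:Int).toNat) = 6 from rfl, show ((7:Int).toNat) = 7 from rfl, show ((8:Int).toNat) = 8 from rfl, show ((9:Int).toNat) = 9 from rfl]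
        norm_num [List.set, List.getD]
        rw [ih _ hlt _ _ _ _ _ _ _ _ _ _ hb1 hb2]
        simp [hd, hm, hmem, (show ¬ (10:Int) ∣ n from by omega)]
        try omega
      · have hmem := (PySem.Int.mod_eq_emod_of_pos (a := n) (b := 10) (by norm_num)).symm.trans hm
        simp only [hm, show ((0:Int).toNat) = 0 from rfl, show ((1:Int).toNat) = 1 from rfl, show ((2:Int).toNat) = 2 from rfl, show ((3:Int).toNat) = 3 from rfl, show ((4:Int).toNat) = 4 from rfl, show ((5:Int).toNat) = 5 from rfl, show ((6:Int).toNat) = 6 from rfl, show ((7:Int).toNat) = 7 from rfl, show ((8:Int).toNat) = 8 from rfl, show ((9:Int).toNat) = 9 from rfl]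
        norm_num [List.set, List.getD]
        rw [ih _ hlt _ _ _ _ _ _ _ _ _ _ hb1 hb2]
        simp [hd, hm, hmem, (show ¬ (10:Int) ∣ n from by omega)]
        try omega
      · have hmem := (PySem.Int.mod_eq_emod_of_pos (a := n) (b := 10) (by norm_num)).symm.trans hm
        simp only [hm, show ((0:Int).toNat) = 0 from rfl, show ((1:Int).toNat) = 1 from rfl, show ((2:Int).toNat) = 2 from rfl, show ((3:Int).toNat) = 3 from rfl, show ((4:Int).toNat) = 4 from rfl, show ((5:Int).toNat) = 5 from rfl, show ((6:Int).toNat) = 6 from rfl, show ((7:Int).toNat) = 7 from rfl, show ((8:Int).toNat) = 8 from rfl, show ((9:Int).toNat) = 9 from rfl]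
        norm_num [List.set, List.getD]
        rw [ih _ hlt _ _ _ _ _ _ _ _ _ _ hb1 hb2]
        simp [hd, hm, hmem, (show ¬ (10:Int) ∣ n from by omega)]
        try omega
      · have hmem := (PySem.Int.mod_eq_emod_of_pos (a := n) (b := 10) (by norm_num)).symm.trans hm
        simp only [hm, show ((0:Int).toNat) = 0 from rfl, show ((1:Int).toNat) = 1 from rfl, show ((2:Int).toNat) = 2 from rfl, show ((3:Int).toNat) = 3 from rfl, show ((4:Int).toNat) = 4 from rfl, show ((5:Int).toNat) = 5 from rfl, show ((6:Int).toNat) = 6 from rfl, show ((7:Int).toNat) = 7 from rfl, show ((8:Int).toNat) = 8 from rfl, show ((9:Int).toNat) = 9 from rfl]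
        norm_num [List.set, List.getD]
        rw [ih _ hlt _ _ _ _ _ _ _ _ _ _ hb1 hb2]
        simp [hd, hm, hmem, (show ¬ (10:Int) ∣ n from by omega)]
        try omega
      · have hmem := (PySem.Int.mod_eq_emod_of_pos (a := n) (b := 10) (by norm_num)).symm.trans hm
        simp only [hm, show ((0:Int).toNat) = 0 from rfl, show ((1:Int).toNat) = 1 from rfl, show ((2:Int).toNat) = 2 from rfl, show ((3:Int).toNat) = 3 from rfl, show ((4:Int).toNat) = 4 from rfl, show ((5:Int).toNat) = 5 from rfl, show ((6:Int).toNat) = 6 from rfl, show ((7:Int).toNat) = 7 from rfl, show ((8:Int).toNat) = 8 from rfl, show ((9:Int).toNat) = 9 from rfl]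
        norm_num [List.set, List.getD]
        rw [ih _ hlt _ _ _ _ _ _ _ _ _ _ hb1 hb2]
        simp [hd, hm, hmem, (show ¬ (10:Int) ∣ n from by omega)]
        try omega
      · have hmem := (PySem.Int.mod_eq_emod_of_pos (a := n) (b := 10) (by norm_num)).symm.trans hm
        simp only [hm, show ((0:Int).toNat) = 0 from rfl, show ((1:Int).toNat) = 1 from rfl, show ((2:Int).toNat) = 2 from rfl, show ((3:Int).toNat) = 3 from rfl, show ((4:Int).toNat) = 4 from rfl, show ((5:Int).toNat) = 5 from rfl, show ((6:Int).toNat) = 6 from rfl, show ((7:Int).toNat) = 7 from rfl, show ((8:Int).toNat) = 8 from rfl, show ((9:Int).toNat) = 9 from rfl]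
        norm_num [List.set, List.getD]
        by_cases hc : c6 > c9
        · rw [if_pos hc, ih _ hlt c0 c1 c2 c3 c4 c5 c6 c7 c8 (c9 + 1) (by omega) (by omega)]
          simp [hd, hm, hmem, (show ¬ (10:Int) ∣ n from by omega)]
          try constructor <;> omega
        · rw [if_neg hc, ih _ hlt c0 c1 c2 c3 c4 c5 (c6 + 1) c7 c8 c9 (by omega) (by omega)]
          simp [hd, hm, hmem, (show ¬ (10:Int) ∣ n from by omega)]
          try constructor <;> omega
      · have hmem := (PySem.Int.mod_eq_emod_of_pos (a := n) (b := 10) (by norm_num)).symm.trans hm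
        simp only [hm, show ((0:Int).toNat) = 0 from rfl, show ((1:Int).toNat) = 1 from rfl, show ((2:Int).toNat) = 2 from rfl, show ((3:Int).toNat) = 3 from rfl, show ((4:Int).toNat) = 4 from rfl, show ((5:Int).toNat) = 5 from rfl, show ((6:Int).toNat) = 6 from rfl, show ((7:Int).toNat) = 7 from rfl, show ((8:Int).toNat) = 8 from rfl, show ((9:Int).toNat) = 9 from rfl]
        norm_num [List.set, List.getD]
        rw [ih _ hlt _ _ _ _ _ _ _ _ _ _ hb1 hb2]
        simp [hd, hm, hmem, (show ¬ (10:Int) ∣ n from by omega)]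
        try omega
      · have hmem := (PySem.Int.mod_eq_emod_of_pos (a := n) (b := 10) (by norm_num)).symm.trans hm
        simp only [hm, show ((0:Int).toNat) = 0 from rfl, show ((1:Int).toNat) = 1 from rfl, show ((2:Int).toNat) = 2 from rfl, show ((3:Int).toNat) = 3 from rfl, show ((4:Int).toNat) = 4 from rfl, show ((5:Int).toNat) = 5 from rfl, show ((6:Int).toNat) = 6 from rfl, show ((7:Int).toNat) = 7 from rfl, show ((8:Int).toNat) = 8 from rfl, show ((9:Int).toNat) = 9 from rfl]
        norm_num [List.set, List.getD]
        rw [ih _ hlt _ _ _ _ _ _ _ _ _ _ hb1 hb2]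
        simp [hd, hm, hmem, (show ¬ (10:Int) ∣ n from by omega)]
        try omega
      · have hmem := (PySem.Int.mod_eq_emod_of_pos (a := n) (b := 10) (by norm_num)).symm.trans hm
        simp only [hm, show ((0:Int).toNat) = 0 from rfl, show ((1:Int).toNat) = 1 from rfl, show ((2:Int).toNat) = 2 from rfl, show ((3:Int).toNat) = 3 from rfl, show ((4:Int).toNat) = 4 from rfl, show ((5:Int).toNat) = 5 from rfl, show ((6:Int).toNat) = 6 from rfl, show ((7:Int).toNat) = 7 from rfl, show ((8:Int).toNat) = 8 from rfl, show ((9:Int).toNat) = 9 from rfl]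
        norm_num [List.set, List.getD]
        by_cases hc : c6 > c9
        · rw [if_pos hc, ih _ hlt c0 c1 c2 c3 c4 c5 c6 c7 c8 (c9 + 1) (by omega) (by omega)]
          simp [hd, hm, hmem, (show ¬ (10:Int) ∣ n from by omega)]
          try constructor <;> omega
        · rw [if_neg hc, ih _ hlt c0 c1 c2 c3 c4 c5 (c6 + 1) c7 c8 c9 (by omega) (by omega)]
          simp [hd, hm, hmem, (show ¬ (10:Int) ∣ n from by omega)]
          try constructor <;> omega
      
    · rw [solveLoop, dif_neg h]
      simp [dcount, h]
      constructor <;> omega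

-- ===== VERDICT (by name: the statement is the Claim_ definition above) =====
theorem solve_spec : Claim_equal_solve := by
  intro n _
  unfold Spec_solve solve solve_alt
  have hinit : (List.replicate 10 (0:Int)) = [0,0,0,0,0,0,0,0,0,0] := by decide
  rw [hinit]
  rw [loopA_char n.toNat n le_rfl 0 0 0 0 0 0 0 0 0 0 (by omega) (by omega)]
  rw [loopB_char n.toNat n le_rfl 0 0 0 0 0 0 0 0 0 0]
  set d0 := dcount n 0
  set d1 := dcount n 1
  set d2 := dcount n 2
  set d3 := dcount n 3
  set d4 := dcount n 4
  set d5 := dcount n 5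
  set d6 := dcount n 6
  set d7 := dcount n 7
  set d8 := dcount n 8
  set d9 := dcount n 9
  simp only [zero_add, List.getD, List.getElem?_cons_succ, List.getElem?_cons_zero,
    Option.getD_some, List.set]
  rw [PySem.Int.floordiv_eq_ediv_of_pos (by norm_num)]
  rw [PySem.List.max?_id_cons, PySem.List.max?_id_cons]
  simp only [List.foldl]
  set C := (d6 + d9 + 1) / 2 with hC
  apply pv_max_swap
  · rw [hC]; omega
  · apply le_trans _ (le_max_left _ _)
    apply le_trans _ (le_max_left _ _)
    exact le_max_right _ _
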